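-- pv_equiv track=rewrite | github.com/jackmisner/BrewTracker | backend/routes/beerxml.py | parse_yeast_name
-- ===== SOURCE A (Python) =====
-- def parse_yeast_name(name):
--     """Parse yeast name to extract manufacturer and cleaned name/code"""
--     if not name:
--         return None, name
--
--     name_lower = name.lower().strip()
--
--     # Known manufacturer patterns (case insensitive)
--     manufacturer_patterns = {
--         "fermentis": ["fermentis"],
--         "wyeast": ["wyeast"],
--         "white labs": ["white labs", "whitelabs", "wlp"],
--         "omega yeast": ["omega yeast", "omega", "oyl"],
--         "imperial yeast": ["imperial yeast", "imperial"],
--         "lallemand": ["lallemand"],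
--     }
--
--     detected_manufacturer = None
--     cleaned_name = name.strip()
--
--     # Check for manufacturer prefixes
--     for manufacturer, patterns in manufacturer_patterns.items():
--         for pattern in patterns:
--             if name_lower.startswith(pattern):
--                 detected_manufacturer = manufacturer
--                 # Remove manufacturer prefix from name
--                 cleaned_name = name[len(pattern) :].strip()
--                 # Remove common separators
--                 if cleaned_name.startswith(("-", " ", "/")):
--                     cleaned_name = cleaned_name[1:].strip()
--                 break
--         if detected_manufacturer:
--             break
--
--     return detected_manufacturer, cleaned_name
-- ===== SOURCE B (Python) =====
-- def parse_yeast_name(name):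
--     """Parse yeast name to extract manufacturer and cleaned name/code"""
--     if not name:
--         return None, name
--
--     name_lower = name.lower().strip()
--
--     # Flat (pattern, manufacturer) table; selection is by LONGEST matching
--     # pattern instead of ordered first-match (no two co-matching patterns
--     # share a length, so this picks the same pattern).
--     prefix_table = [
--         ("fermentis", "fermentis"),
--         ("wyeast", "wyeast"),
--         ("white labs", "white labs"),
--         ("whitelabs", "white labs"),
--         ("wlp", "white labs"),
--         ("omega yeast", "omega yeast"),
--         ("omega", "omega yeast"),
--         ("oyl", "omega yeast"),
--         ("imperial yeast", "imperial yeast"),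
--         ("imperial", "imperial yeast"),
--         ("lallemand", "lallemand"),
--     ]
--
--     best = None
--     for pattern, manufacturer in prefix_table:
--         if name_lower.startswith(pattern) and (
--             best is None or len(pattern) > len(best[0])
--         ):
--             best = (pattern, manufacturer)
--
--     if best is None:
--         return None, name.strip()
--
--     pattern, manufacturer = best
--     cleaned = name[len(pattern):].strip()
--     if cleaned[:1] in ("-", " ", "/"):
--         cleaned = cleaned[1:].strip()
--     return manufacturer, cleaned
-- ===== Notes on version B (the rewrite author's own statement) =====
-- stated objective: alternative
-- what changed: Replaces the ordered nested dict-loop with inner break by a flat (pattern, manufacturer) list scanned once with best-so-far longest-prefix selection; equivalent because no two simultaneously matching patterns share a length.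
import Mathlib
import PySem

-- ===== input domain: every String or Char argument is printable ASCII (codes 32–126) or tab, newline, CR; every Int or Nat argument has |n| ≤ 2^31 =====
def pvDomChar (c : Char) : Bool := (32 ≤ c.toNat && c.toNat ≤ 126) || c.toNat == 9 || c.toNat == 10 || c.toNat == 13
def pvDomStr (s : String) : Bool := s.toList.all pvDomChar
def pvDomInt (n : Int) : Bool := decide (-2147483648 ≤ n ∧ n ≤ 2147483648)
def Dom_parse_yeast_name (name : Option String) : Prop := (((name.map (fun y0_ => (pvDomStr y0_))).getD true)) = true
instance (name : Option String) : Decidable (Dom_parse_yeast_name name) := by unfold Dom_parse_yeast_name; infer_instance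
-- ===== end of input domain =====

-- B replaces A's ordered nested dict-loop with inner break by a flat (pattern, manufacturer)
-- list scanned once with best-so-far longest-prefix selection (objective: alternative decomposition).

-- ===== PORT A =====
-- cleaning step of A's loop body: name[len(pattern):].strip(), then drop one leading "-"/" "/"/"
def pyA_clean (name p : String) : String :=
  let c := PySem.Str.strip (PySem.Str.slice name (some (PySem.Str.len p : Int)) none)
  if (PySem.Str.startswith c "-" || PySem.Str.startswith c " " || PySem.Str.startswith c "/") = true
  then PySem.Str.strip (PySem.Str.slice c (some 1) none) else c

-- inner 'for pattern in patterns: … break': first matching pattern's cleaned name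
def pyA_inner (name nameLower : String) : List String → Option String
  | [] => none
  | p :: rest =>
    if PySem.Str.startswith nameLower p = true then some (pyA_clean name p)
    else pyA_inner name nameLower rest

def pyA_table : List (String × List String) :=
  [("fermentis", ["fermentis"]),
   ("wyeast", ["wyeast"]),
   ("white labs", ["white labs", "whitelabs", "wlp"]),
   ("omega yeast", ["omega yeast", "omega", "oyl"]),
   ("imperial yeast", ["imperial yeast", "imperial"]),
   ("lallemand", ["lallemand"])]

-- outer 'for manufacturer, patterns in …: … if detected_manufacturer: break'
def pyA_loop (name nameLower : String) : List (String × List String) → Option String × String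
  | [] => (none, PySem.Str.strip name)
  | (m, pats) :: rest =>
    match pyA_inner name nameLower pats with
    | some c => (some m, c)
    | none => pyA_loop name nameLower rest

def parse_yeast_name (name : Option String) : Option String × Option String :=
  match name with
  | none => (none, none)
  | some s =>
    if s = "" then (none, some s)
    else
      let nameLower := PySem.Str.strip (PySem.Str.lower s)
      let r := pyA_loop s nameLower pyA_table
      (r.1, some r.2)

-- ===== PORT B =====
def pyB_table : List (String × String) :=
  [("fermentis", "fermentis"),
   ("wyeast", "wyeast"),
   ("white labs", "white labs"),
   ("whitelabs", "white labs"),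
   ("wlp", "white labs"),
   ("omega yeast", "omega yeast"),
   ("omega", "omega yeast"),
   ("oyl", "omega yeast"),
   ("imperial yeast", "imperial yeast"),
   ("imperial", "imperial yeast"),
   ("lallemand", "lallemand")]

-- one step of B's best-so-far scan: keep the new pair iff it matches and is strictly longer
def pyB_step (nameLower : String) (best : Option (String × String)) (pm : String × String) :
    Option (String × String) :=
  if (PySem.Str.startswith nameLower pm.1 &&
      (match best with
       | none => true
       | some b => decide (PySem.Str.len b.1 < PySem.Str.len pm.1))) = true
  then some pm else best

-- B's cleaning: name[len(pattern):].strip(), then 'cleaned[:1] in ("-", " ", "/")'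
def pyB_clean (name p : String) : String :=
  let c := PySem.Str.strip (PySem.Str.slice name (some (PySem.Str.len p : Int)) none)
  if PySem.Str.slice c none (some 1) = "-" ∨ PySem.Str.slice c none (some 1) = " " ∨
     PySem.Str.slice c none (some 1) = "/"
  then PySem.Str.strip (PySem.Str.slice c (some 1) none) else c

def parse_yeast_name_alt (name : Option String) : Option String × Option String :=
  match name with
  | none => (none, none)
  | some s =>
    if s = "" then (none, some s)
    else
      let nameLower := PySem.Str.strip (PySem.Str.lower s)
      match pyB_table.foldl (pyB_step nameLower) none with
      | none => (none, some (PySem.Str.strip s))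
      | some pm => (some pm.2, some (pyB_clean s pm.1))

-- ===== PRECONDITION & SPEC =====
def Spec_parse_yeast_name (name : Option String) (out : Option String × Option String) : Prop := out = parse_yeast_name_alt name
instance (name : Option String) (out : Option String × Option String) : Decidable (Spec_parse_yeast_name name out) := by unfold Spec_parse_yeast_name; infer_instance

-- ===== CLAIM (what is proved, stated in full; the proofs are below) =====
def Claim_equal_parse_yeast_name : Prop := ∀ (name : Option String), Dom_parse_yeast_name name → Spec_parse_yeast_name name (parse_yeast_name name)

-- ===== LEMMAS AND PROOFS =====

-- 's[:1] = "<ch>"' and 's.startswith("<ch>")' agree for one-character patterns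
lemma slice_one_eq_iff (c p : String) (hp : p.toList.length = 1) :
    (PySem.Str.slice c none (some 1) = p) ↔ PySem.Str.startswith c p = true := by
  rw [← String.toList_inj]
  have h1 : PySem.List.slice c.toList none (some 1) = c.toList.take (1:Int).toNat :=
    PySem.List.slice_to c.toList (by norm_num)
  simp [PySem.Str.startswith_eq, PySem.Chars.startswith_iff, h1, List.prefix_iff_eq_take, hp]
  exact eq_comm

lemma clean_eq (nm p : String) : pyA_clean nm p = pyB_clean nm p := by
  unfold pyA_clean pyB_clean
  refine if_congr ?_ rfl rfl
  simp [slice_one_eq_iff _ "-" (by decide), slice_one_eq_iff _ " " (by decide),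
        slice_one_eq_iff _ "/" (by decide)]
  tauto

-- two patterns neither of which is a prefix of the other cannot both be prefixes of L
lemma co_false (L p q : String)
    (h : (p.toList.isPrefixOf q.toList || q.toList.isPrefixOf p.toList) = false)
    (hp : PySem.Str.startswith L p = true) : PySem.Str.startswith L q = false := by
  cases hq : PySem.Str.startswith L q with
  | false => rfl
  | true =>
    exfalso
    have hp' : p.toList <+: L.toList := by
      simpa [PySem.Str.startswith_eq, PySem.Chars.startswith_iff] using hp
    have hq' : q.toList <+: L.toList := by
      simpa [PySem.Str.startswith_eq, PySem.Chars.startswith_iff] using hq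
    rcases List.prefix_or_prefix_of_prefix hp' hq' with h' | h' <;>
      simp [List.isPrefixOf_iff_prefix.mpr h'] at h

-- first ordered match in A's table = longest match over B's flat table
lemma loop_eq (nm L : String) :
    pyA_loop nm L pyA_table =
      (match pyB_table.foldl (pyB_step L) none with
       | none => (none, PySem.Str.strip nm)
       | some pm => (some pm.2, pyA_clean nm pm.1)) := by
  by_cases h1 : PySem.Str.startswith L "fermentis" = true
  · have c1 := co_false L "fermentis" "white labs" (by decide) h1
    have c2 := co_false L "fermentis" "omega yeast" (by decide) h1
    have c3 := co_false L "fermentis" "imperial yeast" (by decide) h1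
    simp at h1 c1 c2 c3
    simp [pyA_loop, pyA_inner, pyA_table, pyB_table, pyB_step, h1, c1, c2, c3]
  ·
    by_cases h2 : PySem.Str.startswith L "wyeast" = true
    · have c1 := co_false L "wyeast" "white labs" (by decide) h2
      have c2 := co_false L "wyeast" "whitelabs" (by decide) h2
      have c3 := co_false L "wyeast" "omega yeast" (by decide) h2
      have c4 := co_false L "wyeast" "imperial yeast" (by decide) h2
      have c5 := co_false L "wyeast" "imperial" (by decide) h2
      have c6 := co_false L "wyeast" "lallemand" (by decide) h2
      simp at h1 h2 c1 c2 c3 c4 c5 c6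
      simp [pyA_loop, pyA_inner, pyA_table, pyB_table, pyB_step, h1, h2, c1, c2, c3, c4, c5, c6]
    ·
      by_cases h3 : PySem.Str.startswith L "white labs" = true
      · have c1 := co_false L "white labs" "omega yeast" (by decide) h3
        have c2 := co_false L "white labs" "imperial yeast" (by decide) h3
        simp at h1 h2 h3 c1 c2
        simp [pyA_loop, pyA_inner, pyA_table, pyB_table, pyB_step, h1, h2, h3, c1, c2]
      ·
        by_cases h4 : PySem.Str.startswith L "whitelabs" = true
        · have c1 := co_false L "whitelabs" "omega yeast" (by decide) h4
          have c2 := co_false L "whitelabs" "imperial yeast" (by decide) h4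
          simp at h1 h2 h3 h4 c1 c2
          simp [pyA_loop, pyA_inner, pyA_table, pyB_table, pyB_step, h1, h2, h3, h4, c1, c2]
        ·
          by_cases h5 : PySem.Str.startswith L "wlp" = true
          · have c1 := co_false L "wlp" "omega yeast" (by decide) h5
            have c2 := co_false L "wlp" "omega" (by decide) h5
            have c3 := co_false L "wlp" "imperial yeast" (by decide) h5
            have c4 := co_false L "wlp" "imperial" (by decide) h5
            have c5 := co_false L "wlp" "lallemand" (by decide) h5
            simp at h1 h2 h3 h4 h5 c1 c2 c3 c4 c5
            simp [pyA_loop, pyA_inner, pyA_table, pyB_table, pyB_step, h1, h2, h3, h4, h5, c1, c2, c3, c4, c5]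
          ·
            by_cases h6 : PySem.Str.startswith L "omega yeast" = true
            · have c1 := co_false L "omega yeast" "imperial yeast" (by decide) h6
              simp at h1 h2 h3 h4 h5 h6 c1
              simp [pyA_loop, pyA_inner, pyA_table, pyB_table, pyB_step, h1, h2, h3, h4, h5, h6, c1]
            ·
              by_cases h7 : PySem.Str.startswith L "omega" = true
              · have c1 := co_false L "omega" "imperial yeast" (by decide) h7
                have c2 := co_false L "omega" "imperial" (by decide) h7
                have c3 := co_false L "omega" "lallemand" (by decide) h7
                simp at h1 h2 h3 h4 h5 h6 h7 c1 c2 c3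
                simp [pyA_loop, pyA_inner, pyA_table, pyB_table, pyB_step, h1, h2, h3, h4, h5, h6, h7, c1, c2, c3]
              ·
                by_cases h8 : PySem.Str.startswith L "oyl" = true
                · have c1 := co_false L "oyl" "imperial yeast" (by decide) h8
                  have c2 := co_false L "oyl" "imperial" (by decide) h8
                  have c3 := co_false L "oyl" "lallemand" (by decide) h8
                  simp at h1 h2 h3 h4 h5 h6 h7 h8 c1 c2 c3
                  simp [pyA_loop, pyA_inner, pyA_table, pyB_table, pyB_step, h1, h2, h3, h4, h5, h6, h7, h8, c1, c2, c3]
                ·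
                  by_cases h9 : PySem.Str.startswith L "imperial yeast" = true
                  · simp at h1 h2 h3 h4 h5 h6 h7 h8 h9
                    simp [pyA_loop, pyA_inner, pyA_table, pyB_table, pyB_step, h1, h2, h3, h4, h5, h6, h7, h8, h9]
                  ·
                    by_cases h10 : PySem.Str.startswith L "imperial" = true
                    · have c1 := co_false L "imperial" "lallemand" (by decide) h10
                      simp at h1 h2 h3 h4 h5 h6 h7 h8 h9 h10 c1
                      simp [pyA_loop, pyA_inner, pyA_table, pyB_table, pyB_step, h1, h2, h3, h4, h5, h6, h7, h8, h9, h10, c1]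
                    ·
                      by_cases h11 : PySem.Str.startswith L "lallemand" = true
                      · simp at h1 h2 h3 h4 h5 h6 h7 h8 h9 h10 h11
                        simp [pyA_loop, pyA_inner, pyA_table, pyB_table, pyB_step, h1, h2, h3, h4, h5, h6, h7, h8, h9, h10, h11]
                      ·
                        simp at h1 h2 h3 h4 h5 h6 h7 h8 h9 h10 h11
                        simp [pyA_loop, pyA_inner, pyA_table, pyB_table, pyB_step, h1, h2, h3, h4, h5, h6, h7, h8, h9, h10, h11]

-- ===== VERDICT (by name: the statement is the Claim_ definition above) =====
theorem parse_yeast_name_spec : Claim_equal_parse_yeast_name := by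
  unfold Claim_equal_parse_yeast_name Spec_parse_yeast_name
  intro name _
  match name with
  | none => rfl
  | some s =>
    unfold parse_yeast_name parse_yeast_name_alt
    by_cases hs : s = ""
    · simp [hs]
    · simp only [if_neg hs]
      rw [loop_eq]
      cases h : pyB_table.foldl (pyB_step (PySem.Str.strip (PySem.Str.lower s))) none with
      | none => simp
      | some pm => simp [clean_eq]
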